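-- pv_equiv track=rewrite | github.com/MrHamdulay/csc3-capstone | examples/data/Assignment_8/rmjkia001/question3.py | encr
-- ===== SOURCE A (Python) =====
-- def encr(s,e):
--     if(len(s)!=0): #if the string has characters; come in
--         if(s[0]=="z"): #if the current letter that we want to work with is z, make it a
--             e=e+"a"
--             return encr(s[1:],e)
--         elif(97<=ord(s[0])<122): # using ascii table, if it lower case letters
--             e=e+chr(ord(s[0])+1) # add the next letter to the encrypted string
--             return encr(s[1:],e)
--         else:
--             e=e+s[0] #if it is not a lower case letter, just add the current letter
--             return encr(s[1:],e)
--     else: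
--         return e
-- ===== SOURCE B (Python) =====
-- def encr(s, e):
--     for c in s:
--         if c == "z":
--             e += "a"
--         elif 97 <= ord(c) < 122:
--             e += chr(ord(c) + 1)
--         else:
--             e += c
--     return e
-- ===== Notes on version B (the rewrite author's own statement) =====
-- stated objective: faster
-- what changed: Replaced accumulator-passing recursion that copies s[1:] and rebuilds e at every step by a single iterative for-loop over the characters appending to e.
import Mathlib
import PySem

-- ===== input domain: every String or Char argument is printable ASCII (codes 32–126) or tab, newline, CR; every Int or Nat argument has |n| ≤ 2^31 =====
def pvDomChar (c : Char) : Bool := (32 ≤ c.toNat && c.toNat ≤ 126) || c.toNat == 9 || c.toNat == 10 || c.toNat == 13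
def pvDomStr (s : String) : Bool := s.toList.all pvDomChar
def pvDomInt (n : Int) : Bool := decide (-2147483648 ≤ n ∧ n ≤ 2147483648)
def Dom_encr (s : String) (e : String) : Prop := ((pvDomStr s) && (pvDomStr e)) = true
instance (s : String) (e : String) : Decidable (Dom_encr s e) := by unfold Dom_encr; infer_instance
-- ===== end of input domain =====

-- B replaces A's accumulator-passing recursion (with s[1:] slicing) by a single for-loop
-- over the characters appending to e; return value identical (objective: simpler).

-- ===== PORT A =====
-- A's recursion on the head of s, threading the accumulator e; s[1:] is the tail.
def encrA : List Char → List Char → List Char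
  | [], e => e
  | c :: rest, e =>
    if c = 'z' then encrA rest (e ++ ['a'])
    else if 97 ≤ c.toNat ∧ c.toNat < 122 then encrA rest (e ++ [Char.ofNat (c.toNat + 1)])
    else encrA rest (e ++ [c])

def encr (s : String) (e : String) : String := String.mk (encrA s.toList e.toList)

-- ===== PORT B =====
-- B's per-character branch body (what the loop appends for character c).
def shiftB (c : Char) : Char :=
  if c = 'z' then 'a'
  else if 97 ≤ c.toNat ∧ c.toNat < 122 then Char.ofNat (c.toNat + 1)
  else c

-- B's for-loop over s with accumulator e, as a left fold.
def encr_alt (s : String) (e : String) : String :=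
  String.mk (s.toList.foldl (fun acc c => acc ++ [shiftB c]) e.toList)

-- ===== PRECONDITION & SPEC =====
def Spec_encr (s : String) (e : String) (out : String) : Prop := out = encr_alt s e
instance (s : String) (e : String) (out : String) : Decidable (Spec_encr s e out) := by unfold Spec_encr; infer_instance

-- ===== CLAIM (what is proved, stated in full; the proofs are below) =====
def Claim_equal_encr : Prop := ∀ (s : String) (e : String), Dom_encr s e → Spec_encr s e (encr s e)

-- ===== LEMMAS AND PROOFS =====
theorem encrA_eq_foldl (l e : List Char) :
    encrA l e = l.foldl (fun acc c => acc ++ [shiftB c]) e := by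
  induction l generalizing e with
  | nil => simp [encrA]
  | cons c rest ih =>
    simp only [encrA, List.foldl, shiftB]
    split_ifs <;> exact ih _

-- ===== VERDICT (by name: the statement is the Claim_ definition above) =====
theorem encr_spec : Claim_equal_encr := by
  intro s e _
  unfold Spec_encr encr encr_alt
  rw [encrA_eq_foldl]
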